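-- pv_equiv track=rewrite | github.com/eloyvallinaes/inteins | src/parse.py | extractHost
-- ===== SOURCE A (Python) =====
-- def extractHost(sequence, inteins):
--     indeces = [0]
--     for i in inteins:
--         indeces += [i['start']] + [i['end']]
--     indeces += [-1]
--
--     host = ''
--     for e in range(0, len(indeces), 2):
--         host += sequence[indeces[e]:indeces[e + 1]]
--
--     return [{"seq": host}]
-- ===== SOURCE B (Python) =====
-- def extractHost(sequence, inteins):
--     parts = []
--     prev = 0
--     for i in inteins:
--         parts.append(sequence[prev:i['start']])
--         prev = i['end']
--     parts.append(sequence[prev:-1])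
--     return [{"seq": ''.join(parts)}]
-- ===== Notes on version B (the rewrite author's own statement) =====
-- stated objective: simpler
-- what changed: Instead of building a flattened index list and re-indexing it pairwise with a stride-2 range loop, B keeps a running cursor over the inteins and collects the slices directly, joining them once at the end.
import Mathlib
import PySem

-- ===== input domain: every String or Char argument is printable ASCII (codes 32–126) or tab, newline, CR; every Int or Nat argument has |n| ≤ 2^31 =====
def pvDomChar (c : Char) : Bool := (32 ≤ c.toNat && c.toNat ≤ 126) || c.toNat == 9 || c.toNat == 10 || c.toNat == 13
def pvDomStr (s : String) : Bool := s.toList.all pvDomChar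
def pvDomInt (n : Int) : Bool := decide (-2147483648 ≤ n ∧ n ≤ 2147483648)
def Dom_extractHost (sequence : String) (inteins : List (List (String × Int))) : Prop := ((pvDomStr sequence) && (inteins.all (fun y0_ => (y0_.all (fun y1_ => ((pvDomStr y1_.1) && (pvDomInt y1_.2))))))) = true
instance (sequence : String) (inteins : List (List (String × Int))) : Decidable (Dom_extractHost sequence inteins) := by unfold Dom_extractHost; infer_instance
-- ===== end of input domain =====

-- B replaces A's flattened index list + stride-2 indexing loop by a running cursor that
-- collects the slices directly; equivalence is proved on all inputs where A returns
-- (Pre_ excludes only inteins missing a 'start'/'end' key, where Python A raises KeyError).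

-- dict lookup i[k]: first match; total form with default 0, exact under Pre_ (key present)
def pvGet (i : List (String × Int)) (k : String) : Int :=
  (PySem.Dict.mk i).getD k 0

-- ===== PORT A =====
-- host is built as a Char list (string += slice, exact: PySem.Str.slice is Chars.slice on toList)
def extractHost (sequence : String) (inteins : List (List (String × Int))) : List (List (String × String)) :=
  let indeces := inteins.foldl (fun acc i => acc ++ [pvGet i "start"] ++ [pvGet i "end"]) [(0 : Int)]
  let indeces := indeces ++ [(-1 : Int)]
  let host := (PySem.List.pyRange 0 (PySem.List.len indeces) 2).foldl
    (fun h e => h ++ PySem.Chars.slice sequence.toList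
      (some (PySem.List.pyGetD indeces e 0)) (some (PySem.List.pyGetD indeces (e + 1) 0))) []
  [[("seq", String.ofList host)]]

-- ===== PORT B =====
def extractHost_alt (sequence : String) (inteins : List (List (String × Int))) : List (List (String × String)) :=
  let st := inteins.foldl
    (fun (st : List String × Int) i =>
      (st.1 ++ [PySem.Str.slice sequence (some st.2) (some (pvGet i "start"))], pvGet i "end"))
    ([], (0 : Int))
  let parts := st.1 ++ [PySem.Str.slice sequence (some st.2) (some (-1))]
  [[("seq", PySem.Str.join "" parts)]]

-- ===== PRECONDITION & SPEC =====
-- Pre_ excludes exactly the inputs where Python A (and B) raise KeyError: an intein dict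
-- without a "start" or "end" key.
def Pre_extractHost (sequence : String) (inteins : List (List (String × Int))) : Prop :=
  ∀ i ∈ inteins, "start" ∈ i.map Prod.fst ∧ "end" ∈ i.map Prod.fst
instance (sequence : String) (inteins : List (List (String × Int))) : Decidable (Pre_extractHost sequence inteins) := by unfold Pre_extractHost; infer_instance
def pvWitness_extractHost : String × (List (List (String × Int))) :=
  ("MKTAYIAK", [[("start", 2), ("end", 5)]])

def Spec_extractHost (sequence : String) (inteins : List (List (String × Int))) (out : List (List (String × String))) : Prop := out = extractHost_alt sequence inteins
instance (sequence : String) (inteins : List (List (String × Int))) (out : List (List (String × String))) : Decidable (Spec_extractHost sequence inteins out) := by unfold Spec_extractHost; infer_instance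

-- ===== CLAIM (what is proved, stated in full; the proofs are below) =====
def Claim_equal_extractHost : Prop := ∀ (sequence : String) (inteins : List (List (String × Int))), Dom_extractHost sequence inteins → Pre_extractHost sequence inteins → Spec_extractHost sequence inteins (extractHost sequence inteins)

-- ===== LEMMAS AND PROOFS =====

-- the sequence of slices both programs produce, as a spec
def chunksS (sequence : String) (prev : Int) : List (List (String × Int)) → List String
  | [] => [PySem.Str.slice sequence (some prev) (some (-1))]
  | i :: t => PySem.Str.slice sequence (some prev) (some (pvGet i "start")) :: chunksS sequence (pvGet i "end") t

def flatI (ts : List (List (String × Int))) : List Int :=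
  ts.flatMap (fun i => [pvGet i "start", pvGet i "end"])

lemma flatI_len (ts : List (List (String × Int))) : (flatI ts).length = 2 * ts.length := by
  induction ts with
  | nil => rfl
  | cons a t ih => simp [flatI, List.flatMap_cons] at *; omega

lemma indeces_eq (ts : List (List (String × Int))) (a : List Int) :
    ts.foldl (fun acc i => acc ++ [pvGet i "start"] ++ [pvGet i "end"]) a = a ++ flatI ts := by
  induction ts generalizing a with
  | nil => simp [flatI]
  | cons i t ih => rw [List.foldl_cons, ih]; simp [flatI, List.flatMap_cons]

lemma join_nil_sep (l : List (List Char)) : ([] : List Char).intercalate l = l.flatten := by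
  induction l with
  | nil => simp [List.intercalate]
  | cons a t ih => cases t <;> simp_all [List.intercalate, List.intersperse]

lemma pyGetD_cons2 (x y d : Int) (l : List Int) (n : Nat) :
    PySem.List.pyGetD (x :: y :: l) ((n : Int) + 2) d = PySem.List.pyGetD l (n : Int) d := by
  have h : ((n : Int) + 2) = ((n + 2 : Nat) : Int) := by push_cast; ring
  rw [h, PySem.List.pyGetD_natCast, PySem.List.pyGetD_natCast]
  show List.getD _ (n + 1 + 1) d = _
  rw [List.getD_cons_succ, List.getD_cons_succ]

lemma pairs (sequence : String) (ts : List (List (String × Int))) (prev : Int) (acc : List Char) :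
    (List.range (ts.length + 1)).foldl
      (fun (h : List Char) (k : Nat) => h ++ PySem.Chars.slice sequence.toList
        (some (PySem.List.pyGetD (prev :: flatI ts ++ [-1]) (2 * (k : Int)) 0))
        (some (PySem.List.pyGetD (prev :: flatI ts ++ [-1]) (2 * (k : Int) + 1) 0))) acc
    = acc ++ ((chunksS sequence prev ts).map String.toList).flatten := by
  induction ts generalizing prev acc with
  | nil =>
    show acc ++ _ = _
    have h0 : PySem.List.pyGetD (prev :: flatI [] ++ [-1]) (2 * ((0 : Nat) : Int)) 0 = prev := by
      norm_num [flatI]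
    have h1 : PySem.List.pyGetD (prev :: flatI [] ++ [-1]) (2 * ((0 : Nat) : Int) + 1) 0 = -1 := by
      norm_num [flatI, PySem.List.pyGetD]
    rw [h0, h1]
    simp [chunksS, PySem.Str.toList_slice]
  | cons i t ih =>
    have hL : prev :: flatI (i :: t) ++ [-1]
        = prev :: pvGet i "start" :: (pvGet i "end" :: flatI t ++ [-1]) := by
      simp [flatI, List.flatMap_cons]
    rw [List.range_succ_eq_map, List.foldl_cons, List.foldl_map]
    simp only [List.length_cons]
    have hfirst :
        acc ++ PySem.Chars.slice sequence.toList
          (some (PySem.List.pyGetD (prev :: flatI (i :: t) ++ [-1]) (2 * ((0 : Nat) : Int)) 0))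
          (some (PySem.List.pyGetD (prev :: flatI (i :: t) ++ [-1]) (2 * ((0 : Nat) : Int) + 1) 0))
        = acc ++ PySem.Chars.slice sequence.toList (some prev) (some (pvGet i "start")) := by
      rw [hL]
      have i0 : (2 : Int) * ((0 : Nat) : Int) = ((0 : Nat) : Int) := by norm_num
      have i1 : (2 : Int) * ((0 : Nat) : Int) + 1 = ((1 : Nat) : Int) := by norm_num
      rw [i1, i0, PySem.List.pyGetD_natCast, PySem.List.pyGetD_natCast]
      rfl
    have hf : (fun (h : List Char) (k : Nat) => h ++ PySem.Chars.slice sequence.toList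
          (some (PySem.List.pyGetD (prev :: flatI (i :: t) ++ [-1]) (2 * ((k.succ : Nat) : Int)) 0))
          (some (PySem.List.pyGetD (prev :: flatI (i :: t) ++ [-1]) (2 * ((k.succ : Nat) : Int) + 1) 0)))
        = (fun (h : List Char) (k : Nat) => h ++ PySem.Chars.slice sequence.toList
          (some (PySem.List.pyGetD (pvGet i "end" :: flatI t ++ [-1]) (2 * ((k : Nat) : Int)) 0))
          (some (PySem.List.pyGetD (pvGet i "end" :: flatI t ++ [-1]) (2 * ((k : Nat) : Int) + 1) 0))) := by
      funext h k
      have e1 : (2 : Int) * ((k.succ : Nat) : Int) = ((2 * k : Nat) : Int) + 2 := by push_cast; ring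
      have e2 : (2 : Int) * ((k.succ : Nat) : Int) + 1 = ((2 * k + 1 : Nat) : Int) + 2 := by push_cast; ring
      have e3 : (2 : Int) * ((k : Nat) : Int) = ((2 * k : Nat) : Int) := by push_cast; ring
      have e4 : (2 : Int) * ((k : Nat) : Int) + 1 = ((2 * k + 1 : Nat) : Int) := by push_cast; ring
      rw [hL, e2, e1, e4, e3, pyGetD_cons2, pyGetD_cons2]
    rw [hfirst, hf, ih (pvGet i "end") (acc ++ PySem.Chars.slice sequence.toList (some prev) (some (pvGet i "start")))]
    simp [chunksS, PySem.Str.toList_slice]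

lemma foldB (sequence : String) (ts : List (List (String × Int))) (acc : List String) (prev : Int) :
    (ts.foldl
        (fun (st : List String × Int) i =>
          (st.1 ++ [PySem.Str.slice sequence (some st.2) (some (pvGet i "start"))], pvGet i "end"))
        (acc, prev)).1
      ++ [PySem.Str.slice sequence
            (some (ts.foldl
              (fun (st : List String × Int) i =>
                (st.1 ++ [PySem.Str.slice sequence (some st.2) (some (pvGet i "start"))], pvGet i "end"))
              (acc, prev)).2) (some (-1))]
    = acc ++ chunksS sequence prev ts := by
  induction ts generalizing acc prev with
  | nil => simp [chunksS]
  | cons i t ih => simp only [List.foldl_cons, ih, chunksS]; simp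

lemma pyRange_stride2 (n : Nat) :
    PySem.List.pyRange 0 ((2 * n + 2 : Nat) : Int) 2
      = (List.range (n + 1)).map (fun (k : Nat) => 2 * (k : Int)) := by
  rw [PySem.List.pyRange_of_pos 0 _ (by norm_num)]
  have : (if (0 : Int) < ((2 * n + 2 : Nat) : Int)
      then ((((2 * n + 2 : Nat) : Int) - 0 + 2 - 1) / 2).toNat else 0) = n + 1 := by
    rw [if_pos (by push_cast; omega)]
    omega
  rw [this]
  exact List.map_congr_left (by intro k _; omega)

-- ===== VERDICT (by name: the statement is the Claim_ definition above) =====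
theorem extractHost_spec : Claim_equal_extractHost := by
  intro sequence inteins _ _
  show extractHost sequence inteins = extractHost_alt sequence inteins
  simp only [extractHost, extractHost_alt]
  rw [indeces_eq, foldB]
  have hlen : PySem.List.len (([(0 : Int)] ++ flatI inteins) ++ [-1])
      = ((2 * inteins.length + 2 : Nat) : Int) := by
    rw [PySem.List.len_eq]
    simp [flatI_len]
    omega
  rw [hlen, pyRange_stride2, List.foldl_map]
  have hlist : ([(0 : Int)] ++ flatI inteins) ++ [-1] = (0 : Int) :: flatI inteins ++ [-1] := by
    simp
  rw [hlist, pairs sequence inteins 0 []]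
  simp only [List.nil_append]
  have hjoin : PySem.Str.join "" (chunksS sequence 0 inteins)
      = String.ofList ((chunksS sequence 0 inteins).map String.toList).flatten := by
    rw [← String.toList_inj, PySem.Str.toList_join, String.toList_ofList]
    simp [PySem.Chars.join, join_nil_sep]
  rw [hjoin]
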